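-- pv_equiv track=rewrite | github.com/JLaumen/l-sharp-square-algorithm | run_benchmarks.py | get_possible_words
-- ===== SOURCE A (Python) =====
-- def get_possible_words(prefix: str, suffix: str, alphabet: list) -> list:
--     words = []
--     if suffix:
--         if suffix[0] == "X":
--             for letter in alphabet:
--                 words.extend(get_possible_words(prefix + letter, suffix[1:], alphabet))
--         else:
--             letter = suffix[0]
--             words.extend(get_possible_words(prefix + letter, suffix[1:], alphabet))
--         return words
--     else:
--         return [prefix]
-- ===== SOURCE B (Python) =====
-- import itertools
--
-- def get_possible_words(prefix: str, suffix: str, alphabet: list) -> list: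
--     choices = [alphabet if c == "X" else [c] for c in suffix]
--     return [prefix + "".join(combo) for combo in itertools.product(*choices)]
-- ===== Notes on version B (the rewrite author's own statement) =====
-- stated objective: idiomatic
-- what changed: Replaces the growing-prefix recursion over the suffix with a precomputed per-position choice list fed to itertools.product, joining each combination once.
import Mathlib
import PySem

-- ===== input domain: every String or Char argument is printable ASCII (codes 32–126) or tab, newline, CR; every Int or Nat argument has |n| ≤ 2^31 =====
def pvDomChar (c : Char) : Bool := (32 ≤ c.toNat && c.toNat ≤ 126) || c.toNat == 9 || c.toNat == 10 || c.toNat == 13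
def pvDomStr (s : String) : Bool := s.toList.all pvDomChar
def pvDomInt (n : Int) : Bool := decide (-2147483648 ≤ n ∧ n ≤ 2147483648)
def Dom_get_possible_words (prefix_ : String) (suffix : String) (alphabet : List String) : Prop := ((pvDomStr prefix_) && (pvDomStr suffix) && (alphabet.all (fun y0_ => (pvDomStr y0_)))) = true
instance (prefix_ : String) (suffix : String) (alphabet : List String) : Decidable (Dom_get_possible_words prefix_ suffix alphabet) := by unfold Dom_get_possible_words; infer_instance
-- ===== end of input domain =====

-- B replaces A's growing-prefix recursion with a per-position choice list fed to a cartesian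
-- product, joining each combination once (idiomatic; same output, same order).

-- ===== PORT A =====
-- A's recursion, on the char-list representation of the strings (strings are rebuilt at the end);
-- exact step-for-step: empty suffix → [prefix]; 'X' head → extend over alphabet; else consume the literal char.
def pvGpwA (prefix_ : List Char) (suffix : List Char) (alphabet : List String) : List (List Char) :=
  match suffix with
  | [] => [prefix_]
  | c :: rest =>
    if c = 'X' then
      alphabet.foldl (fun words letter => words ++ pvGpwA (prefix_ ++ letter.toList) rest alphabet) []
    else
      [] ++ pvGpwA (prefix_ ++ [c]) rest alphabet

def get_possible_words (prefix_ : String) (suffix : String) (alphabet : List String) : List String :=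
  (pvGpwA prefix_.toList suffix.toList alphabet).map String.ofList

-- ===== PORT B =====
-- choices = [alphabet if c == 'X' else [c] for c in suffix]  (as char lists)
def pvChoices (suffix : List Char) (alphabet : List String) : List (List (List Char)) :=
  suffix.map (fun c => if c = 'X' then alphabet.map String.toList else [[c]])

-- itertools.product(*choices): rightmost position varies fastest
def pvProduct (choices : List (List (List Char))) : List (List (List Char)) :=
  choices.foldr (fun ch acc => ch.flatMap (fun x => acc.map (x :: ·))) [[]]

def get_possible_words_alt (prefix_ : String) (suffix : String) (alphabet : List String) : List String :=
  (pvProduct (pvChoices suffix.toList alphabet)).map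
    (fun combo => String.ofList (prefix_.toList ++ combo.flatMap id))

-- ===== PRECONDITION & SPEC =====
def Spec_get_possible_words (prefix_ : String) (suffix : String) (alphabet : List String) (out : List String) : Prop := out = get_possible_words_alt prefix_ suffix alphabet
instance (prefix_ : String) (suffix : String) (alphabet : List String) (out : List String) : Decidable (Spec_get_possible_words prefix_ suffix alphabet out) := by unfold Spec_get_possible_words; infer_instance

-- ===== CLAIM (what is proved, stated in full; the proofs are below) =====
def Claim_equal_get_possible_words : Prop := ∀ (prefix_ : String) (suffix : String) (alphabet : List String), Dom_get_possible_words prefix_ suffix alphabet → Spec_get_possible_words prefix_ suffix alphabet (get_possible_words prefix_ suffix alphabet)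

-- ===== LEMMAS AND PROOFS =====

theorem pvGpwA_eq_product (suffix : List Char) (alphabet : List String) (prefix_ : List Char) :
    pvGpwA prefix_ suffix alphabet =
      (pvProduct (pvChoices suffix alphabet)).map (fun combo => prefix_ ++ combo.flatMap id) := by
  induction suffix generalizing prefix_ with
  | nil => simp [pvGpwA, pvChoices, pvProduct]
  | cons c rest ih =>
    by_cases hc : c = 'X'
    · subst hc
      show alphabet.foldl (fun words letter => words ++ pvGpwA (prefix_ ++ letter.toList) rest alphabet) [] = _
      rw [PySem.List.foldl_append_eq_flatMap]
      simp only [pvChoices, List.map_cons, pvProduct, List.foldr_cons, if_true, List.nil_append,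
        List.flatMap_map, List.map_flatMap, List.map_map]
      refine List.flatMap_congr (fun letter _ => ?_)
      rw [ih]
      simp [pvProduct, pvChoices, Function.comp, List.append_assoc]
    · simp only [pvGpwA, if_neg hc, List.nil_append, pvChoices, List.map_cons, pvProduct,
        List.foldr_cons, ih, List.flatMap_cons, List.flatMap_nil, List.append_nil,
        List.map_map]
      simp [Function.comp, List.append_assoc]

-- ===== VERDICT (by name: the statement is the Claim_ definition above) =====
theorem get_possible_words_spec : Claim_equal_get_possible_words := by
  intro prefix_ suffix alphabet _
  unfold Spec_get_possible_words get_possible_words get_possible_words_alt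
  rw [pvGpwA_eq_product, List.map_map]
  rfl
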